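-- pv_equiv track=rewrite | github.com/Zekai-Zhao775/LeetCode | Juejin/11. 观光景点组合得分问题.py | solution
-- ===== SOURCE A (Python) =====
-- def solution(values: list) -> int:
--     # PLEASE DO NOT MODIFY THE FUNCTION SIGNATURE
--     # write code here
--     max_point = 0
--     i = 0
--     j = 0
--     gap = 1
--     len_values = len(values)
--     while gap <= len_values - 1:
--         i = 0
--         j = i + gap
--         while j < len_values:
--             point = values[i] + values[j] + i - j
--             if point > max_point:
--                 max_point = point
--             i += 1
--             j += 1
--         gap += 1
--
--     return max_point  # Placeholder return
-- ===== SOURCE B (Python) =====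
-- def solution(values: list) -> int:
--     # Single pass: track the best values[i] + i seen so far; floor the result at 0 as A does.
--     max_point = 0
--     if values:
--         best = values[0]
--         for j in range(1, len(values)):
--             max_point = max(max_point, best + values[j] - j)
--             best = max(best, values[j] + j)
--     return max_point
-- ===== Notes on version B (the rewrite author's own statement) =====
-- stated objective: faster
-- what changed: Replaced the quadratic scan over all index pairs (grouped by gap) with a single left-to-right pass that maintains the running maximum of values[i]+i, so each j is combined only with the best earlier i.
import Mathlib
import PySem

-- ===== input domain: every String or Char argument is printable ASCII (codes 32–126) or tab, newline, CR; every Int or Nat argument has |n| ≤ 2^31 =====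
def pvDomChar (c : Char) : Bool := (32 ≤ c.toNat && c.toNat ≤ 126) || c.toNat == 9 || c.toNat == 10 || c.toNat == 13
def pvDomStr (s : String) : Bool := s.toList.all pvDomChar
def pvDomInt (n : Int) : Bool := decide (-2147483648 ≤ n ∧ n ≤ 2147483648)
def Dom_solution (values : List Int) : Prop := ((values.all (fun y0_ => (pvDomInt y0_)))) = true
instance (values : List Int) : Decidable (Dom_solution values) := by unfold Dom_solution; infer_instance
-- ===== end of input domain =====

-- B replaces A's quadratic pair scan by a single pass tracking the running maximum of values[i]+i (objective: faster).

-- ===== PORT A =====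
-- A: outer while over gap = 1..n-1; inner while pairs (i, i+gap) for i = 0..n-gap-1; running max floored at 0.
def solution (values : List Int) : Int :=
  let len_values : Int := values.length
  (PySem.List.pyRange 1 len_values 1).foldl
    (fun max_point gap =>
      (PySem.List.pyRange 0 (len_values - gap) 1).foldl
        (fun max_point i =>
          let point := PySem.List.pyGetD values i 0 + PySem.List.pyGetD values (i + gap) 0 + i - (i + gap)
          if point > max_point then point else max_point)
        max_point)
    0

-- ===== PORT B =====
-- B: one pass over j = 1..n-1 with state (max_point, best = max of values[i]+i over i < j).
def solution_alt (values : List Int) : Int :=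
  match values with
  | [] => 0
  | v0 :: rest =>
    let n : Int := (v0 :: rest).length
    let st := (PySem.List.pyRange 1 n 1).foldl
      (fun (st : Int × Int) j =>
        (max st.1 (st.2 + PySem.List.pyGetD (v0 :: rest) j 0 - j),
         max st.2 (PySem.List.pyGetD (v0 :: rest) j 0 + j)))
      (0, v0)
    st.1

-- ===== PRECONDITION & SPEC =====
def Spec_solution (values : List Int) (out : Int) : Prop := out = solution_alt values
instance (values : List Int) (out : Int) : Decidable (Spec_solution values out) := by unfold Spec_solution; infer_instance

-- ===== CLAIM (what is proved, stated in full; the proofs are below) =====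
def Claim_equal_solution : Prop := ∀ (values : List Int), Dom_solution values → Spec_solution values (solution values)

-- ===== LEMMAS AND PROOFS =====

-- pair score
def gf (v : List Int) (i j : Int) : Int :=
  PySem.List.pyGetD v i 0 + PySem.List.pyGetD v j 0 + i - j

-- r is an upper bound of {0} ∪ {gf i j : 0 ≤ i < j < k}
def UBk (v : List Int) (k : Int) (r : Int) : Prop :=
  0 ≤ r ∧ ∀ i j : Int, 0 ≤ i → i < j → j < k → gf v i j ≤ r

-- r belongs to {0} ∪ {gf i j : 0 ≤ i < j < k}
def Memk (v : List Int) (k : Int) (r : Int) : Prop :=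
  r = 0 ∨ ∃ i j : Int, 0 ≤ i ∧ i < j ∧ j < k ∧ r = gf v i j

lemma unique_of_UB_Mem {v : List Int} {k a b : Int}
    (ha : UBk v k a) (hma : Memk v k a) (hb : UBk v k b) (hmb : Memk v k b) : a = b := by
  have hab : a ≤ b := by
    rcases hma with h | ⟨i, j, h1, h2, h3, h4⟩
    · subst h; exact hb.1
    · subst h4; exact hb.2 i j h1 h2 h3
  have hba : b ≤ a := by
    rcases hmb with h | ⟨i, j, h1, h2, h3, h4⟩
    · subst h; exact ha.1
    · subst h4; exact ha.2 i j h1 h2 h3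
  omega

-- ---- A side: flatten the nested fold into a fold of max over a candidate list ----

lemma foldl_flatMap' {α β γ : Type} (g : α → List β) (f : γ → β → γ) (l : List α) (a : γ) :
    (l.flatMap g).foldl f a = l.foldl (fun a x => (g x).foldl f a) a := by
  induction l generalizing a with
  | nil => rfl
  | cons x xs ih => simp [List.flatMap_cons, List.foldl_append, ih]

def candsA (v : List Int) : List Int :=
  ((PySem.List.pyRange 1 (v.length : Int) 1).flatMap
    (fun gap => (PySem.List.pyRange 0 ((v.length : Int) - gap) 1).map (fun i => (i, i + gap)))).map
    (fun p => gf v p.1 p.2)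

lemma if_gt_eq_max (a b : Int) : (if b > a then b else a) = max a b := by
  split <;> omega

lemma solution_eq_fold_cands (v : List Int) :
    solution v = (candsA v).foldl max 0 := by
  unfold solution candsA
  rw [List.foldl_map, foldl_flatMap']
  refine PySem.List.foldl_congr_mem _ _ _ _ (fun acc gap hg => ?_)
  rw [List.foldl_map]
  refine PySem.List.foldl_congr_mem _ _ _ _ (fun acc2 i hi => ?_)
  simp only [gf]
  exact if_gt_eq_max acc2 _

lemma mem_candsA_iff (v : List Int) (x : Int) :
    x ∈ candsA v ↔ ∃ i j : Int, 0 ≤ i ∧ i < j ∧ j < (v.length : Int) ∧ x = gf v i j := by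
  unfold candsA
  constructor
  · intro hx
    rcases List.mem_map.1 hx with ⟨p, hp, rfl⟩
    rcases List.mem_flatMap.1 hp with ⟨gap, hg, hij⟩
    rw [PySem.List.mem_pyRange_one] at hg
    rcases List.mem_map.1 hij with ⟨i', hi', rfl⟩
    rw [PySem.List.mem_pyRange_one] at hi'
    exact ⟨i', i' + gap, hi'.1, by omega, by omega, rfl⟩
  · rintro ⟨i, j, h0, h1, h2, rfl⟩
    refine List.mem_map.2 ⟨(i, j), List.mem_flatMap.2 ⟨j - i, ?_, ?_⟩, rfl⟩
    · rw [PySem.List.mem_pyRange_one]; omega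
    · refine List.mem_map.2 ⟨i, ?_, ?_⟩
      · rw [PySem.List.mem_pyRange_one]; omega
      · rw [show i + (j - i) = j from by omega]

lemma UB_A (v : List Int) : UBk v (v.length : Int) (solution v) := by
  rw [solution_eq_fold_cands]
  obtain ⟨h0, hall⟩ := PySem.List.le_foldl_max (candsA v) 0
  refine ⟨h0, fun i j hi hij hj => ?_⟩
  exact hall _ ((mem_candsA_iff v _).2 ⟨i, j, hi, hij, hj, rfl⟩)

lemma Mem_A (v : List Int) : Memk v (v.length : Int) (solution v) := by
  rw [solution_eq_fold_cands]
  rcases PySem.List.foldl_max_mem (candsA v) 0 with h | h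
  · exact Or.inl h
  · exact Or.inr ((mem_candsA_iff v _).1 h)

-- ---- B side: loop invariant for the single pass ----

def stepB (v : List Int) (st : Int × Int) (j : Int) : Int × Int :=
  (max st.1 (st.2 + PySem.List.pyGetD v j 0 - j),
   max st.2 (PySem.List.pyGetD v j 0 + j))

def InvB (v : List Int) (k : Int) (st : Int × Int) : Prop :=
  (∃ i : Int, 0 ≤ i ∧ i < k ∧ st.2 = PySem.List.pyGetD v i 0 + i) ∧
  (∀ i : Int, 0 ≤ i → i < k → PySem.List.pyGetD v i 0 + i ≤ st.2) ∧
  Memk v k st.1 ∧ UBk v k st.1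

lemma invB_fold (v0 : Int) (rest : List Int) :
    ∀ k : Nat, 1 ≤ k →
      InvB (v0 :: rest) (k : Int)
        ((PySem.List.pyRange 1 (k : Int) 1).foldl (stepB (v0 :: rest)) (0, v0)) := by
  intro k hk
  induction k with
  | zero => omega
  | succ m ih =>
    by_cases hm : 1 ≤ m
    · have hsp : PySem.List.pyRange 1 ((m : Int) + 1) 1
          = PySem.List.pyRange 1 (m : Int) 1 ++ [(m : Int)] :=
        PySem.List.pyRange_one_succ_right (show (1:Int) ≤ (m:Int) by omega)
      have hms : ((m + 1 : Nat) : Int) = (m : Int) + 1 := by push_cast; ring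
      rw [hms, hsp, List.foldl_append]
      obtain ⟨⟨i0, hi00, hi01, hbest⟩, hbub, hmem, hub⟩ := ih hm
      set st := (PySem.List.pyRange 1 (m : Int) 1).foldl (stepB (v0 :: rest)) (0, v0) with hst
      refine ⟨?_, ?_, ?_, ?_⟩
      · -- best membership
        simp only [List.foldl_cons, List.foldl_nil, stepB]
        rcases le_total (PySem.List.pyGetD (v0 :: rest) (m : Int) 0 + (m : Int)) st.2 with h | h
        · exact ⟨i0, hi00, by omega, by omega⟩
        · exact ⟨(m : Int), by omega, by omega, by omega⟩
      · -- best upper bound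
        simp only [List.foldl_cons, List.foldl_nil, stepB]
        intro i hi0 hi1
        rcases lt_or_ge i (m : Int) with h | h
        · exact le_trans (hbub i hi0 h) (le_max_left _ _)
        · have : i = (m : Int) := by omega
          subst this; exact le_max_right _ _
      · -- max_point membership
        simp only [List.foldl_cons, List.foldl_nil, stepB]
        rcases le_total (st.2 + PySem.List.pyGetD (v0 :: rest) (m : Int) 0 - (m : Int)) st.1 with h | h
        · rw [max_eq_left h]
          rcases hmem with h0 | ⟨i, j, h1, h2, h3, h4⟩
          · exact Or.inl h0
          · exact Or.inr ⟨i, j, h1, h2, by omega, h4⟩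
        · rw [max_eq_right h]
          exact Or.inr ⟨i0, (m : Int), hi00, by omega, by omega, by rw [hbest]; unfold gf; ring⟩
      · -- max_point upper bound
        simp only [List.foldl_cons, List.foldl_nil, stepB]
        refine ⟨le_trans hub.1 (le_max_left _ _), fun i j hi hij hj => ?_⟩
        rcases lt_or_ge j (m : Int) with h | h
        · exact le_trans (hub.2 i j hi hij h) (le_max_left _ _)
        · have hjm : j = (m : Int) := by omega
          subst hjm
          have h1 : PySem.List.pyGetD (v0 :: rest) i 0 + i ≤ st.2 := hbub i hi (by omega)
          have : gf (v0 :: rest) i (m : Int) ≤ st.2 + PySem.List.pyGetD (v0 :: rest) (m : Int) 0 - (m : Int) := by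
            unfold gf; omega
          exact le_trans this (le_max_right _ _)
    · -- m = 0 : base case k = 1
      have hm0 : m = 0 := by omega
      subst hm0
      have h1 : PySem.List.pyRange 1 (((0 : Nat) + 1 : Nat) : Int) 1 = [] :=
        PySem.List.pyRange_one_eq_nil (by norm_num)
      rw [h1]
      refine ⟨⟨0, le_refl 0, by norm_num, by simp [PySem.List.pyGetD_zero_cons]⟩, ?_, Or.inl rfl, ?_⟩
      · intro i hi0 hi1
        have : i = 0 := by omega
        subst this; simp [PySem.List.pyGetD_zero_cons]
      · exact ⟨le_refl 0, fun i j hi hij hj => by omega⟩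

lemma UB_Mem_B (v : List Int) : UBk v (v.length : Int) (solution_alt v) ∧ Memk v (v.length : Int) (solution_alt v) := by
  cases v with
  | nil =>
    constructor
    · exact ⟨le_refl 0, fun i j hi hij hj => by simp at hj; omega⟩
    · exact Or.inl rfl
  | cons v0 rest =>
    have hlen : ((v0 :: rest).length : Int) = ((rest.length + 1 : Nat) : Int) := by simp
    have h := invB_fold v0 rest (rest.length + 1) (by omega)
    obtain ⟨_, _, hmem, hub⟩ := h
    have heq : solution_alt (v0 :: rest)
        = ((PySem.List.pyRange 1 ((rest.length + 1 : Nat) : Int) 1).foldl (stepB (v0 :: rest)) (0, v0)).1 := by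
      simp only [solution_alt, List.length_cons]
      push_cast
      rfl
    rw [hlen, heq]
    exact ⟨hub, hmem⟩

-- ===== VERDICT (by name: the statement is the Claim_ definition above) =====
theorem solution_spec : Claim_equal_solution := by
  intro values _
  unfold Spec_solution
  obtain ⟨hubB, hmemB⟩ := UB_Mem_B values
  exact unique_of_UB_Mem (UB_A values) (Mem_A values) hubB hmemB
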